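-- pv_equiv track=rewrite | github.com/zhix9767/Leetcode | code/Word Search.py | preCheck
-- ===== SOURCE A (Python) =====
-- def preCheck(board,word):
--     dic={}
--
--     for i in word:
--         dic[i]=dic.get(i,0)+1
--     for i in board:
--         for j in i:
--             if j in dic and dic[j]>0: dic[j]-=1
--     for i in dic.values():
--         if i>0: return False
--     return True
-- ===== SOURCE B (Python) =====
-- def preCheck(board, word):
--     cells = [c for row in board for c in row]
--     for ch in word:
--         if ch in cells:
--             cells.remove(ch)
--         else:
--             return False
--     return True
-- ===== Notes on version B (the rewrite author's own statement) =====
-- stated objective: alternative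
-- what changed: Instead of counting word characters into a dict and decrementing it while scanning the board, B flattens the board into a pool list and consumes one matching cell per word character with list.remove, failing when a character has no remaining supply.
import Mathlib
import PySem

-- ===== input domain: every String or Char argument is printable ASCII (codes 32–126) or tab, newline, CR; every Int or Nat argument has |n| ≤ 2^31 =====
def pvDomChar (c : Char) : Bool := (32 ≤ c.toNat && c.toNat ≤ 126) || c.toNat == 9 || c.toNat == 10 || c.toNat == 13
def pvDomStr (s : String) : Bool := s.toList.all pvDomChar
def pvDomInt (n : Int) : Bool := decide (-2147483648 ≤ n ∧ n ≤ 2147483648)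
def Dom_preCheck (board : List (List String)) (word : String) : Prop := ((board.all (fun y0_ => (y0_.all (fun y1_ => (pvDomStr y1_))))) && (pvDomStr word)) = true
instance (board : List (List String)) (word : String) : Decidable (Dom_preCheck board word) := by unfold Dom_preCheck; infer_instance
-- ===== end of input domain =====

-- B replaces A's count-then-guarded-decrement dict scheme by a consumption loop: flatten the
-- board into a pool list and remove one matching cell per word character (a different algorithm,
-- not claimed faster).

-- ===== PORT A =====
-- the body of A's inner board loop: 'if j in dic and dic[j] > 0: dic[j] -= 1'
def preCheckStep (d : PySem.Dict String Int) (j : String) : PySem.Dict String Int :=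
  if d.contains j && decide (d.getD j 0 > 0) then d.insert j (d.getD j 0 - 1) else d

def preCheck (board : List (List String)) (word : String) : Bool :=
  let dic := word.toList.foldl
    (fun d c => d.insert (String.singleton c) (d.getD (String.singleton c) 0 + 1)) PySem.Dict.empty
  let dic := board.foldl (fun d row => row.foldl preCheckStep d) dic
  !(dic.values.any (fun v => decide (v > 0)))

-- ===== PORT B =====
-- 'if ch in cells: cells.remove(ch) else: return False' — remove? is exactly membership + removal
def preCheckGo : List Char → List String → Bool
  | [], _ => true
  | ch :: t, cells =>
    match PySem.List.remove? cells (String.singleton ch) with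
    | some cells' => preCheckGo t cells'
    | none => false

def preCheck_alt (board : List (List String)) (word : String) : Bool :=
  preCheckGo word.toList (board.flatMap id)

-- ===== PRECONDITION & SPEC =====
def Spec_preCheck (board : List (List String)) (word : String) (out : Bool) : Prop := out = preCheck_alt board word
instance (board : List (List String)) (word : String) (out : Bool) : Decidable (Spec_preCheck board word out) := by unfold Spec_preCheck; infer_instance

-- ===== CLAIM (what is proved, stated in full; the proofs are below) =====
def Claim_equal_preCheck : Prop := ∀ (board : List (List String)) (word : String), Dom_preCheck board word → Spec_preCheck board word (preCheck board word)

-- ===== LEMMAS AND PROOFS =====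

-- A's decrement loop never changes the key list of the dict
theorem preCheck_scan_keys (cells : List String) (d : PySem.Dict String Int) :
    (cells.foldl preCheckStep d).keys = d.keys := by
  induction cells generalizing d with
  | nil => rfl
  | cons j t ih =>
    simp only [List.foldl_cons, ih]
    unfold preCheckStep
    split
    · next h =>
      have hc : d.contains j = true := by
        rcases Bool.and_eq_true_iff.mp h with ⟨h1, _⟩; exact h1
      exact PySem.Dict.keys_insert_of_contains _ _ hc
    · rfl

-- A's decrement loop: with nonnegative start values, the final value at k is the initial
-- value minus the number of occurrences of k among the scanned cells, clipped at 0.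
theorem preCheck_scan_getD (cells : List String) (d : PySem.Dict String Int)
    (hnn : ∀ j, 0 ≤ d.getD j 0) (k : String) :
    (cells.foldl preCheckStep d).getD k 0 = max 0 (d.getD k 0 - (cells.count k : Int)) := by
  induction cells generalizing d with
  | nil => simp; have := hnn k; omega
  | cons j t ih =>
    simp only [List.foldl_cons]
    by_cases hc : (d.contains j && decide (d.getD j 0 > 0)) = true
    · have hpos : 0 < d.getD j 0 := by
        rcases Bool.and_eq_true_iff.mp hc with ⟨_, h2⟩; simpa using h2
      have hstep : preCheckStep d j = d.insert j (d.getD j 0 - 1) := by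
        unfold preCheckStep; simp [hc]
      rw [hstep, ih _ (fun x => by
        rw [PySem.Dict.getD_insert]
        split
        · omega
        · exact hnn x)]
      rw [PySem.Dict.getD_insert]
      by_cases hk : k = j
      · subst hk
        simp
        omega
      · simp [hk, Ne.symm hk]
    · have hstep : preCheckStep d j = d := by unfold preCheckStep; simp [hc]
      rw [hstep, ih _ hnn]
      by_cases hk : k = j
      · subst hk
        have h0 : d.getD k 0 = 0 := by
          by_cases hco : d.contains k = true
          · have := hnn k
            simp [hco] at hc
            omega
          · exact PySem.Dict.getD_of_not_contains _ _ (by simpa using hco)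
        simp [h0]
      · simp [Ne.symm hk]

-- A returns True iff every string's demand (count among the word's chars-as-strings)
-- is covered by its supply (count among the flattened board cells)
theorem preCheck_iff (board : List (List String)) (word : String) :
    preCheck board word = true ↔
      ∀ s : String, (word.toList.map String.singleton).count s ≤ board.flatten.count s := by
  have h1 : word.toList.foldl
      (fun d c => PySem.Dict.insert d (String.singleton c) (PySem.Dict.getD d (String.singleton c) 0 + 1)) PySem.Dict.empty
      = PySem.Dict.counter (word.toList.map String.singleton) := by
    rw [← PySem.Dict.foldl_insert_getD_add_one_eq_counter, List.foldl_map]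
  have h3 : ∀ (d0 : PySem.Dict String Int),
      board.foldl (fun d row => row.foldl preCheckStep d) d0 = board.flatten.foldl preCheckStep d0 := by
    intro d0; rw [List.foldl_flatten]
  set W := word.toList.map String.singleton with hW
  set C := board.flatten with hC
  have hnn : ∀ j, 0 ≤ (PySem.Dict.counter W).getD j 0 := by
    intro j; rw [PySem.Dict.getD_counter]; positivity
  have hnd : (C.foldl preCheckStep (PySem.Dict.counter W)).keys.Nodup := by
    rw [preCheck_scan_keys]; exact PySem.Dict.nodup_keys_counter W
  unfold preCheck
  simp only [h1, h3]
  rw [PySem.Dict.values_eq_map_keys _ hnd 0, preCheck_scan_keys, PySem.Dict.keys_counter,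
      List.any_map, Bool.not_eq_true', List.any_eq_false]
  constructor
  · intro h s
    by_cases hs : s ∈ W
    · have hno := h s ((PySem.Set.mem_ofList W s).mpr hs)
      simp [preCheck_scan_getD C _ hnn s, PySem.Dict.getD_counter] at hno
      omega
    · have : W.count s = 0 := List.count_eq_zero.mpr hs
      omega
  · intro h k hk
    have hkW := (PySem.Set.mem_ofList W k).mp hk
    have := h k
    simp [preCheck_scan_getD C _ hnn k, PySem.Dict.getD_counter]
    omega

-- B's consumption loop succeeds iff every string's demand is covered by the pool
theorem preCheckGo_iff (w : List Char) (cells : List String) :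
    preCheckGo w cells = true ↔
      ∀ s : String, (w.map String.singleton).count s ≤ cells.count s := by
  induction w generalizing cells with
  | nil => simp [preCheckGo]
  | cons ch t ih =>
    by_cases hm : String.singleton ch ∈ cells
    · rw [preCheckGo, PySem.List.remove?_eq_some_erase _ _ hm]
      simp only []
      rw [ih]
      have hpos : 0 < cells.count (String.singleton ch) := List.count_pos_iff.mpr hm
      constructor
      · intro h s
        have hs := h s
        rw [List.count_erase] at hs
        simp only [List.map_cons, List.count_cons]
        by_cases e : s = String.singleton ch
        · subst e; simp at hs ⊢; omega
        · simp [Ne.symm e] at hs ⊢; omega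
      · intro h s
        have hs := h s
        rw [List.count_erase]
        simp only [List.map_cons, List.count_cons] at hs
        by_cases e : s = String.singleton ch
        · subst e; simp at hs ⊢; omega
        · simp [Ne.symm e] at hs ⊢; omega
    · rw [preCheckGo, (PySem.List.remove?_eq_none_iff _ _).mpr hm]
      simp only []
      constructor
      · intro h; exact absurd h (by simp)
      · intro h
        have := h (String.singleton ch)
        have h0 : cells.count (String.singleton ch) = 0 := List.count_eq_zero.mpr hm
        simp at this
        omega

theorem preCheck_eq_alt (board : List (List String)) (word : String) :
    preCheck board word = preCheck_alt board word := by
  have hB : preCheck_alt board word = true ↔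
      ∀ s : String, (word.toList.map String.singleton).count s ≤ board.flatten.count s := by
    unfold preCheck_alt
    rw [preCheckGo_iff]
    simp [List.flatMap_id]
  have hA := preCheck_iff board word
  cases hA' : preCheck board word
  · cases hB' : preCheck_alt board word
    · rfl
    · exact absurd (hA.mpr (hB.mp hB')) (by simp [hA'])
  · rw [hB.mpr (hA.mp hA')]

-- ===== VERDICT (by name: the statement is the Claim_ definition above) =====
theorem preCheck_spec : Claim_equal_preCheck := by
  intro board word _
  unfold Spec_preCheck
  exact preCheck_eq_alt board word
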